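-- pv_equiv track=rewrite | github.com/hyunjune-lee/python_algorithm_interview | 코딩테스트 대비를 위한 백준 문제 추천/BOJ_10422 - 괄호_fail_ver.py | sol
-- ===== SOURCE A (Python) =====
-- def sol(L):
--     if L % 2 == 1:
--         return 0
--     bracket_wrap = 0
--     bracket_add = 1
--     while L != 2:
--         bracket_wrap, bracket_add = bracket_wrap + bracket_add, 2* bracket_wrap + bracket_add
--         L -= 2
--     return (bracket_wrap + bracket_add) % 1000000007
-- ===== SOURCE B (Python) =====
-- M = 1000000007
--
-- def sol(L):
--     if L % 2 == 1:
--         return 0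
--     # (1+sqrt2)^n in Z[sqrt2] mod M via binary exponentiation; answer = a+w where
--     # (a, w) represents a + w*sqrt2 and n = (L-2)//2.
--     n = (L - 2) // 2
--     a, w = 1, 0        # accumulator = 1
--     ba, bw = 1, 1      # base = 1 + sqrt2
--     while n > 0:
--         if n & 1:
--             a, w = (a * ba + 2 * w * bw) % M, (a * bw + w * ba) % M
--         ba, bw = (ba * ba + 2 * bw * bw) % M, (2 * ba * bw) % M
--         n >>= 1
--     return (a + w) % M
-- ===== Notes on version B (the rewrite author's own statement) =====
-- stated objective: alternative
-- what changed: A iterates the linear recurrence (w,a)->(w+a,2w+a) once per 2 units of L on growing bigints; B computes the same value as (1+sqrt2)^((L-2)/2) in Z[sqrt2] by binary exponentiation with all arithmetic mod 1e9+7.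
-- outside the precondition, e.g. on sol(0): A does not finish within the time limit, B returns 1
import Mathlib
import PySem

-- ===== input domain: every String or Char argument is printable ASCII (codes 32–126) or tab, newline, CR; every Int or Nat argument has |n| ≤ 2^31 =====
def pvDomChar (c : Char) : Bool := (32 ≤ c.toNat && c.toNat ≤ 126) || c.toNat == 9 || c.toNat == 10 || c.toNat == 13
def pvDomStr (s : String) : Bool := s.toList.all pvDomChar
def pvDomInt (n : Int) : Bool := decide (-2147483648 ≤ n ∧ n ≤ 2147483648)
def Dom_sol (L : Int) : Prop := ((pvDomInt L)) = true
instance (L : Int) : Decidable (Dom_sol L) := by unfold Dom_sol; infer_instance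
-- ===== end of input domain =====

-- B computes the same return value by a different algorithm: binary exponentiation of (1+√2) in Z[√2] with arithmetic mod 1e9+7, instead of A's step-by-step recurrence iteration.

-- ===== PORT A =====
-- A's while loop runs ((L-2)/2) times for even L ≥ 2 (ported as fuel); state (bracket_wrap, bracket_add).
def solLoop : Nat → Int × Int → Int × Int
  | 0, p => p
  | n + 1, (w, a) => solLoop n (w + a, 2 * w + a)

def sol (L : Int) : Int :=
  if PySem.Int.mod L 2 = 1 then 0
  else
    let p := solLoop ((L - 2) / 2).toNat (0, 1)
    PySem.Int.mod (p.1 + p.2) 1000000007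

-- ===== PORT B =====
-- binary exponentiation of (1+√2) in Z[√2], pairs (a,w) = a + w√2, all arithmetic mod 1e9+7
def solAltLoop (a w ba bw : Int) (n : Int) : Int × Int :=
  if 0 < n then
    let q := if PySem.Int.band n 1 = 1 then
        (PySem.Int.mod (a * ba + 2 * w * bw) 1000000007,
         PySem.Int.mod (a * bw + w * ba) 1000000007)
      else (a, w)
    solAltLoop q.1 q.2
      (PySem.Int.mod (ba * ba + 2 * bw * bw) 1000000007)
      (PySem.Int.mod (2 * ba * bw) 1000000007)
      (n >>> (1 : Nat))
  else (a, w)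
termination_by n.toNat
decreasing_by
  have h1 : n >>> (1 : Nat) = n / 2 := by simpa using Int.shiftRight_eq_div_pow n 1
  rw [h1]; omega

def sol_alt (L : Int) : Int :=
  if PySem.Int.mod L 2 = 1 then 0
  else
    let p := solAltLoop 1 0 1 1 (PySem.Int.floordiv (L - 2) 2)
    PySem.Int.mod (p.1 + p.2) 1000000007

-- ===== PRECONDITION & SPEC =====
-- Pre_ excludes even L < 2, where A's while loop never reaches 2 and diverges (B returns 1 there).
def Pre_sol (L : Int) : Prop := PySem.Int.mod L 2 = 1 ∨ 2 ≤ L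
instance (L : Int) : Decidable (Pre_sol L) := by unfold Pre_sol; infer_instance
def pvWitness_sol : Int := 10

def Spec_sol (L : Int) (out : Int) : Prop := out = sol_alt L
instance (L : Int) (out : Int) : Decidable (Spec_sol L out) := by unfold Spec_sol; infer_instance

-- ===== CLAIM (what is proved, stated in full; the proofs are below) =====
def Claim_equal_sol : Prop := ∀ (L : Int), Dom_sol L → Pre_sol L → Spec_sol L (sol L)

-- ===== LEMMAS AND PROOFS =====

-- multiplication in Z[√2]: (a,w) = a + w√2
def emul (x y : Int × Int) : Int × Int := (x.1 * y.1 + 2 * x.2 * y.2, x.1 * y.2 + x.2 * y.1)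

def epow (x : Int × Int) : Nat → Int × Int
  | 0 => (1, 0)
  | n + 1 => emul x (epow x n)

theorem emul_comm (x y : Int × Int) : emul x y = emul y x := by
  simp [emul, Prod.ext_iff]; constructor <;> ring

theorem emul_assoc (x y z : Int × Int) : emul (emul x y) z = emul x (emul y z) := by
  simp [emul, Prod.ext_iff]; constructor <;> ring

theorem emul_one (x : Int × Int) : emul x (1, 0) = x := by
  simp [emul]

theorem epow_succ (x : Int × Int) (n : Nat) : epow x (n + 1) = emul x (epow x n) := rfl

theorem epow_two_mul (x : Int × Int) (k : Nat) :
    epow x (2 * k) = epow (emul x x) k := by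
  induction k with
  | zero => simp [epow]
  | succ m ih =>
      have h2 : 2 * (m + 1) = 2 * m + 1 + 1 := by omega
      rw [h2, epow_succ, epow_succ, ← emul_assoc, ih, epow_succ]

-- congruence mod 1e9+7 on pairs
def PCong (x y : Int × Int) : Prop :=
  x.1 % 1000000007 = y.1 % 1000000007 ∧ x.2 % 1000000007 = y.2 % 1000000007

theorem pcong_refl (x : Int × Int) : PCong x x := ⟨rfl, rfl⟩

theorem pcong_trans {x y z : Int × Int} (h1 : PCong x y) (h2 : PCong y z) : PCong x z :=
  ⟨h1.1.trans h2.1, h1.2.trans h2.2⟩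

theorem pcong_emul {x x' y y' : Int × Int} (hx : PCong x x') (hy : PCong y y') :
    PCong (emul x y) (emul x' y') := by
  obtain ⟨h1, h2⟩ := hx; obtain ⟨h3, h4⟩ := hy
  have e1 : x.1 ≡ x'.1 [ZMOD 1000000007] := h1
  have e2 : x.2 ≡ x'.2 [ZMOD 1000000007] := h2
  have e3 : y.1 ≡ y'.1 [ZMOD 1000000007] := h3
  have e4 : y.2 ≡ y'.2 [ZMOD 1000000007] := h4
  exact ⟨((e1.mul e3).add ((Int.ModEq.refl 2).mul e2 |>.mul e4) : _ ≡ _ [ZMOD _]),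
         ((e1.mul e4).add (e2.mul e3) : _ ≡ _ [ZMOD _])⟩

theorem pcong_pymod (x : Int × Int) :
    PCong (PySem.Int.mod x.1 1000000007, PySem.Int.mod x.2 1000000007) x := by
  rw [PySem.Int.mod_eq_emod_of_pos (by norm_num), PySem.Int.mod_eq_emod_of_pos (by norm_num)]
  exact ⟨Int.emod_emod_of_dvd _ dvd_rfl, Int.emod_emod_of_dvd _ dvd_rfl⟩

-- A's loop computes (the swap of) (1+√2)^n times the initial element
theorem solLoop_eq (n : Nat) : ∀ v : Int × Int,
    solLoop n (v.2, v.1) = ((emul (epow (1,1) n) v).2, (emul (epow (1,1) n) v).1) := by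
  induction n with
  | zero =>
      intro v
      have h : emul (epow (1,1) 0) v = v := by rw [show epow (1,1) 0 = (1,0) from rfl, emul_comm, emul_one]
      simp [solLoop, h]
  | succ k ih =>
      intro v
      have harg : (v.2 + v.1, 2 * v.2 + v.1) = ((emul (1,1) v).2, (emul (1,1) v).1) := by
        simp [emul, Prod.ext_iff]; ring
      have hstep : solLoop (k+1) (v.2, v.1) = solLoop k ((emul (1,1) v).2, (emul (1,1) v).1) := by
        rw [show solLoop (k+1) (v.2, v.1) = solLoop k (v.2 + v.1, 2 * v.2 + v.1) from rfl, harg]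
      rw [hstep, ih (emul (1,1) v), ← emul_assoc, emul_comm (epow (1,1) k) (1,1), ← epow_succ]

-- B's loop: invariant acc ≡ x, base ≡ y  ⇒  result ≡ x · y^(n.toNat)
theorem solAltLoop_eq (m : Nat) : ∀ (n : Int), n.toNat = m →
    ∀ (a w ba bw : Int) (x y : Int × Int), PCong (a, w) x → PCong (ba, bw) y →
    PCong (solAltLoop a w ba bw n) (emul x (epow y n.toNat)) := by
  induction m using Nat.strong_induction_on with
  | _ m ih =>
    intro n hm a w ba bw x y hx hy
    by_cases hn : 0 < n
    · have hsh : n >>> (1 : Nat) = n / 2 := by simpa using Int.shiftRight_eq_div_pow n 1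
      rw [solAltLoop]
      simp only [hn, if_true]
      have hband : PySem.Int.band n 1 = PySem.Int.mod n 2 := PySem.Int.band_one n
      have hrec := ih ((n / 2).toNat) (by omega) (n / 2) rfl
      have hbase : PCong (PySem.Int.mod (ba * ba + 2 * bw * bw) 1000000007,
                          PySem.Int.mod (2 * ba * bw) 1000000007) (emul y y) := by
        refine pcong_trans (pcong_pymod (ba * ba + 2 * bw * bw, 2 * ba * bw)) ?_
        have he : (ba * ba + 2 * bw * bw, 2 * ba * bw) = emul (ba, bw) (ba, bw) := by
          simp [emul, Prod.ext_iff]; ring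
        rw [he]; exact pcong_emul hy hy
      by_cases hodd : PySem.Int.band n 1 = 1
      · simp only [hodd, if_true]
        have hacc : PCong (PySem.Int.mod (a * ba + 2 * w * bw) 1000000007,
                           PySem.Int.mod (a * bw + w * ba) 1000000007) (emul x y) := by
          refine pcong_trans (pcong_pymod (a * ba + 2 * w * bw, a * bw + w * ba)) ?_
          exact pcong_emul hx hy
        have hthis := hrec _ _ _ _ (emul x y) (emul y y) hacc hbase
        have hodd' : n % 2 = 1 := by
          rw [hband, PySem.Int.mod_eq_emod_of_pos (by norm_num : (0:Int) < 2)] at hodd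
          exact hodd
        have hk : n.toNat = 2 * (n / 2).toNat + 1 := by omega
        have heq : emul x (epow y (2 * (n / 2).toNat + 1)) =
            emul (emul x y) (epow (emul y y) ((n / 2).toNat)) := by
          rw [epow_succ, ← emul_assoc, epow_two_mul]
        rw [hsh, hk, heq]
        exact hthis
      · simp only [hodd, if_false]
        have hthis := hrec _ _ _ _ x (emul y y) hx hbase
        have hodd' : n % 2 = 0 := by
          rw [hband, PySem.Int.mod_eq_emod_of_pos (by norm_num : (0:Int) < 2)] at hodd
          omega
        have hk : n.toNat = 2 * (n / 2).toNat := by omega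
        rw [hsh, hk, epow_two_mul]
        exact hthis
    · rw [solAltLoop]
      simp only [hn, if_false]
      have h0 : n.toNat = 0 := by omega
      rw [h0]
      have h : emul x (epow y 0) = x := by
        rw [show epow y 0 = (1,0) from rfl, emul_one]
      rw [h]; exact hx

-- ===== VERDICT (by name: the statement is the Claim_ definition above) =====
theorem sol_spec : Claim_equal_sol := by
  intro L _ hpre
  unfold Spec_sol sol sol_alt
  rw [PySem.Int.mod_eq_emod_of_pos (by norm_num : (0:Int) < 2)]
  unfold Pre_sol at hpre
  rw [PySem.Int.mod_eq_emod_of_pos (by norm_num : (0:Int) < 2)] at hpre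
  by_cases hodd : L % 2 = 1
  · simp [hodd]
  · simp only [hodd, if_false]
    have hL : 2 ≤ L := hpre.resolve_left hodd
    have hfd : PySem.Int.floordiv (L - 2) 2 = (L - 2) / 2 :=
      PySem.Int.floordiv_eq_ediv_of_pos (by norm_num)
    have hnn : 0 ≤ (L - 2) / 2 := Int.ediv_nonneg (by omega) (by norm_num)
    set n : Nat := ((L - 2) / 2).toNat with hn
    -- A side
    have hA : solLoop n (0, 1) = ((epow (1,1) n).2, (epow (1,1) n).1) := by
      have := solLoop_eq n (1, 0)
      rw [emul_one] at this
      exact this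
    -- B side
    have hB : PCong (solAltLoop 1 0 1 1 ((L - 2) / 2)) (epow (1,1) n) := by
      have h := solAltLoop_eq n ((L - 2) / 2) rfl 1 0 1 1 (1, 0) (1, 1)
        (pcong_refl _) (pcong_refl _)
      have hid : emul (1, 0) (epow (1,1) ((L - 2) / 2).toNat) = epow (1,1) n := by
        rw [emul_comm, emul_one]
      rw [hid] at h
      exact h
    rw [hfd, hA]
    obtain ⟨h1, h2⟩ := hB
    rw [PySem.Int.mod_eq_emod_of_pos (by norm_num : (0:Int) < 1000000007),
        PySem.Int.mod_eq_emod_of_pos (by norm_num : (0:Int) < 1000000007)]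
    have hsum : ((solAltLoop 1 0 1 1 ((L-2)/2)).2 + (solAltLoop 1 0 1 1 ((L-2)/2)).1) % 1000000007
        = ((epow (1,1) n).2 + (epow (1,1) n).1) % 1000000007 := Int.ModEq.add h2 h1
    rw [← hsum, Int.add_comm]
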